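-- pv_equiv track=rewrite | github.com/pranavik24/CodeSwitch | src/codeswitch_pipeline/generation.py | _ensure_inter_sentential_shape
-- ===== SOURCE A (Python) =====
-- def _ensure_inter_sentential_shape(tokens: list[str]) -> list[str]:
--     if any(token in {".", "!", "?"} for token in tokens[:-1]):
--         return tokens
--
--     split_markers = {",", "and", "but", "because", "so", "then"}
--     split_index = None
--     midpoint = len(tokens) // 2
--     for offset in range(len(tokens)):
--         left = midpoint - offset
--         right = midpoint + offset
--         for candidate in (left, right):
--             if 0 < candidate < len(tokens) - 1 and str(tokens[candidate]).lower() in split_markers: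
--                 split_index = candidate
--                 break
--         if split_index is not None:
--             break
--
--     if split_index is None:
--         return tokens
--
--     new_tokens = tokens[:]
--     marker = new_tokens[split_index]
--     if str(marker).lower() == ",":
--         new_tokens[split_index] = "."
--     else:
--         new_tokens[split_index] = "."
--     next_index = split_index + 1
--     if next_index < len(new_tokens):
--         new_tokens[next_index] = _capitalize_token(new_tokens[next_index])
--     return new_tokens
--
-- def _capitalize_token(token: str) -> str:
--     if not token:
--         return token
--     if token[0].isalpha():
--         return token[0].upper() + token[1:]
--     return token
-- ===== SOURCE B (Python) =====
-- def _capitalize_token(token: str) -> str: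
--     if not token:
--         return token
--     if token[0].isalpha():
--         return token[0].upper() + token[1:]
--     return token
--
--
-- def _ensure_inter_sentential_shape(tokens: list[str]) -> list[str]:
--     if any(token in {".", "!", "?"} for token in tokens[:-1]):
--         return tokens
--
--     split_markers = {",", "and", "but", "because", "so", "then"}
--     n = len(tokens)
--     midpoint = n // 2
--     candidates = [i for i, tok in enumerate(tokens)
--                   if 0 < i < n - 1 and str(tok).lower() in split_markers]
--     if not candidates:
--         return tokens
--
--     split_index = min(candidates, key=lambda i: (abs(i - midpoint), i))
--     new_tokens = tokens[:]
--     new_tokens[split_index] = "."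
--     next_index = split_index + 1
--     if next_index < n:
--         new_tokens[next_index] = _capitalize_token(new_tokens[next_index])
--     return new_tokens
-- ===== Notes on version B (the rewrite author's own statement) =====
-- stated objective: simpler
-- what changed: The nested outward-from-midpoint search loop (offset loop with a left/right candidate pair and break flags) is replaced by a single comprehension collecting all eligible marker indices plus one min() with the lexicographic key (abs(i-midpoint), i), which reproduces the nearest-to-midpoint, left-wins tie-break; the pointless if/else on the marker (both arms write '.') is dropped.
import Mathlib
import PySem

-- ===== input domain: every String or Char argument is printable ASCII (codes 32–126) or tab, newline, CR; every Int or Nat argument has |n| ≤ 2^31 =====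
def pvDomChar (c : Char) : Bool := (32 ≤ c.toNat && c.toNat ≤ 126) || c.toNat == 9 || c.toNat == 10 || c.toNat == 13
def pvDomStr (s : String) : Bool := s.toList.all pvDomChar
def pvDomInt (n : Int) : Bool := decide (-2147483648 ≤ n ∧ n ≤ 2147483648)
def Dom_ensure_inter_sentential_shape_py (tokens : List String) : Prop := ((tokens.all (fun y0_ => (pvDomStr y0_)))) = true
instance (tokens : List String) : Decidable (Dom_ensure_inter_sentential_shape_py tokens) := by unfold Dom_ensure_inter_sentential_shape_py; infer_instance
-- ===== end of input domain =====

-- B replaces A's nested outward-from-midpoint search loop by one comprehension over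
-- enumerate plus min() with key (abs(i-midpoint), i) — simpler, same behaviour.


-- ===== PORT A =====
-- token in {".", "!", "?"}  (set membership: order-independent)
def pvIsSentPunct (t : String) : Bool := [".", "!", "?"].contains t

-- str(tok).lower() in {",", "and", "but", "because", "so", "then"}
def pvIsMarker (t : String) : Bool :=
  [",", "and", "but", "because", "so", "then"].contains (PySem.Str.lower t)

-- _capitalize_token (shared verbatim by both Pythons)
def pvCapitalizeToken (token : String) : String :=
  match token.toList with
  | [] => token
  | c :: rest =>
    if PySem.Chars.isalpha c then String.mk (PySem.Chars.upperChar c :: rest) else token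

-- the guard '0 < candidate < len(tokens) - 1 and str(tokens[candidate]).lower() in split_markers'
def pvCondA (tokens : List String) (n c : Int) : Bool :=
  decide (0 < c) && decide (c < n - 1) && pvIsMarker (PySem.List.pyGetD tokens c "")

-- A's outer 'for offset in range(len(tokens))' with the inner (left, right) pass and breaks
def pvLoopA (tokens : List String) (n mid : Int) : List Int → Option Int
  | [] => none
  | off :: rest =>
    let left := mid - off
    let right := mid + off
    if pvCondA tokens n left then some left
    else if pvCondA tokens n right then some right
    else pvLoopA tokens n mid rest

def ensure_inter_sentential_shape_py (tokens : List String) : List String :=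
  if (PySem.List.slice tokens none (some (-1))).any pvIsSentPunct then tokens
  else
    let n : Int := (tokens.length : Int)
    let mid := PySem.Int.floordiv n 2
    match pvLoopA tokens n mid (PySem.List.pyRange 0 n 1) with
    | none => tokens
    | some si =>
      let marker := PySem.List.pyGetD tokens si ""
      let nt := if PySem.Str.lower marker = "," then PySem.List.pySetD tokens si "."
                else PySem.List.pySetD tokens si "."
      let ni := si + 1
      if ni < n then PySem.List.pySetD nt ni (pvCapitalizeToken (PySem.List.pyGetD nt ni ""))
      else nt

-- ===== PORT B =====
def ensure_inter_sentential_shape_py_alt (tokens : List String) : List String :=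
  if (PySem.List.slice tokens none (some (-1))).any pvIsSentPunct then tokens
  else
    let n : Int := (tokens.length : Int)
    let mid := PySem.Int.floordiv n 2
    let cands := ((PySem.List.enumerate tokens 0).filter
        (fun p => decide (0 < p.1) && decide (p.1 < n - 1) && pvIsMarker p.2)).map (·.1)
    match PySem.List.min2? cands (fun i => |i - mid|) (fun i => i) with
    | none => tokens
    | some si =>
      let nt := PySem.List.pySetD tokens si "."
      let ni := si + 1
      if ni < n then PySem.List.pySetD nt ni (pvCapitalizeToken (PySem.List.pyGetD nt ni ""))
      else nt

-- ===== PRECONDITION & SPEC =====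
def Spec_ensure_inter_sentential_shape_py (tokens : List String) (out : List String) : Prop := out = ensure_inter_sentential_shape_py_alt tokens
instance (tokens : List String) (out : List String) : Decidable (Spec_ensure_inter_sentential_shape_py tokens out) := by unfold Spec_ensure_inter_sentential_shape_py; infer_instance

-- ===== CLAIM (what is proved, stated in full; the proofs are below) =====
def Claim_equal_ensure_inter_sentential_shape_py : Prop := ∀ (tokens : List String), Dom_ensure_inter_sentential_shape_py tokens → Spec_ensure_inter_sentential_shape_py tokens (ensure_inter_sentential_shape_py tokens)

-- ===== LEMMAS AND PROOFS =====

-- B's candidate list as a plain definition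
def pvCands (tokens : List String) (n : Int) : List Int :=
  ((PySem.List.enumerate tokens 0).filter
      (fun p => decide (0 < p.1) && decide (p.1 < n - 1) && pvIsMarker p.2)).map (·.1)

-- the fold step of PySem.List.min2? at Int keys
def pvStep (k1 k2 : Int → Int) (acc : Option Int) (x : Int) : Option Int :=
  match acc with
  | none => some x
  | some m => if (decide (k1 x < k1 m) || !decide (k1 m < k1 x) && decide (k2 x < k2 m)) = true
              then some x else some m

theorem pvMin2_eq_foldl (k1 k2 : Int → Int) (xs : List Int) :
    PySem.List.min2? xs k1 k2 = xs.foldl (pvStep k1 k2) none := by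
  unfold PySem.List.min2?
  congr 1
  funext acc x
  cases acc <;> rfl

theorem pvAux (k1 k2 : Int → Int) (xs : List Int) (a x : Int)
    (hx : x = a ∨ x ∈ xs)
    (h : ∀ y, (y = a ∨ y ∈ xs) → y ≠ x → k1 x < k1 y ∨ (k1 x = k1 y ∧ k2 x < k2 y)) :
    xs.foldl (pvStep k1 k2) (some a) = some x := by
  induction xs generalizing a with
  | nil => simp at hx; simp [hx]
  | cons y t ih =>
    by_cases hb : (decide (k1 y < k1 a) || !decide (k1 a < k1 y) && decide (k2 y < k2 a)) = true
    · have hstep : List.foldl (pvStep k1 k2) (some a) (y :: t) = List.foldl (pvStep k1 k2) (some y) t := by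
        simp only [List.foldl, pvStep]; rw [if_pos hb]
      rw [hstep]
      simp only [Bool.or_eq_true, Bool.and_eq_true, decide_eq_true_eq, Bool.not_eq_true',
        decide_eq_false_iff_not] at hb
      apply ih y
      · by_cases hxy : x = y
        · exact Or.inl hxy
        · rcases hx with rfl | hx
          · exfalso
            have hlex := h y (Or.inr (List.mem_cons_self ..)) (fun hh => hxy hh.symm)
            rcases hlex with h1 | ⟨h1, h2⟩ <;> rcases hb with hb | ⟨hb1, hb2⟩ <;> omega
          · rcases List.mem_cons.mp hx with rfl | hx
            · exact absurd rfl hxy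
            · exact Or.inr hx
      · intro z hz hzx
        apply h z _ hzx
        rcases hz with rfl | hz
        · exact Or.inr (List.mem_cons_self ..)
        · exact Or.inr (List.mem_cons_of_mem _ hz)
    · have hstep : List.foldl (pvStep k1 k2) (some a) (y :: t) = List.foldl (pvStep k1 k2) (some a) t := by
        simp only [List.foldl, pvStep]; rw [if_neg hb]
      rw [hstep]
      simp only [Bool.or_eq_true, Bool.and_eq_true, decide_eq_true_eq, Bool.not_eq_true',
        decide_eq_false_iff_not, not_or, not_and, not_lt, not_not] at hb
      obtain ⟨hb1, hb2⟩ := hb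
      apply ih a
      · rcases hx with rfl | hx
        · exact Or.inl rfl
        · rcases List.mem_cons.mp hx with rfl | hx
          · by_cases hxa : x = a
            · exact Or.inl hxa
            · exfalso
              have hlex := h a (Or.inl rfl) (fun hh => hxa hh.symm)
              rcases hlex with h1 | ⟨h1, h2⟩
              · omega
              · have := hb2 (le_of_eq h1); omega
          · exact Or.inr hx
      · intro z hz hzx
        apply h z _ hzx
        rcases hz with rfl | hz
        · exact Or.inl rfl
        · exact Or.inr (List.mem_cons_of_mem _ hz)

-- min2? returns the unique strict lexicographic minimum
theorem pvMin2_eq_some (k1 k2 : Int → Int) (xs : List Int) (x : Int) (hx : x ∈ xs)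
    (h : ∀ y ∈ xs, y ≠ x → k1 x < k1 y ∨ (k1 x = k1 y ∧ k2 x < k2 y)) :
    PySem.List.min2? xs k1 k2 = some x := by
  rw [pvMin2_eq_foldl]
  cases xs with
  | nil => cases hx
  | cons a t =>
    have : List.foldl (pvStep k1 k2) (none : Option Int) (a :: t)
        = List.foldl (pvStep k1 k2) (some a) t := rfl
    rw [this]
    apply pvAux
    · rcases List.mem_cons.mp hx with rfl | hx
      · exact Or.inl rfl
      · exact Or.inr hx
    · intro y hy hyx
      apply h y _ hyx
      rcases hy with rfl | hy
      · exact List.mem_cons_self ..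
      · exact List.mem_cons_of_mem _ hy

-- membership in B's candidate list is exactly A's guard
theorem pvMem_cands (tokens : List String) (c : Int) :
    c ∈ pvCands tokens (tokens.length : Int) ↔ pvCondA tokens (tokens.length : Int) c = true := by
  constructor
  · intro hc
    simp only [pvCands, List.mem_map] at hc
    obtain ⟨p, hp, rfl⟩ := hc
    rw [List.mem_filter] at hp
    obtain ⟨hpe, hcond⟩ := hp
    rw [PySem.List.mem_enumerate_iff] at hpe
    obtain ⟨k, hk, rfl⟩ := hpe
    simp only [Bool.and_eq_true, decide_eq_true_eq] at hcond
    obtain ⟨⟨h1, h2⟩, h3⟩ := hcond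
    simp only [pvCondA, Bool.and_eq_true, decide_eq_true_eq]
    refine ⟨⟨by simpa using h1, by simpa using h2⟩, ?_⟩
    have : PySem.List.pyGetD tokens ((0 : Int) + (k : Int)) "" = tokens[k] := by
      rw [zero_add, PySem.List.pyGetD_natCast]
      exact List.getD_eq_getElem _ _ hk
    rw [this]
    simpa using h3
  · intro hc
    simp only [pvCondA, Bool.and_eq_true, decide_eq_true_eq] at hc
    obtain ⟨⟨h1, h2⟩, h3⟩ := hc
    have hkn : c.toNat < tokens.length := by omega
    have hcast : ((c.toNat : Int)) = c := by omega
    simp only [pvCands, List.mem_map]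
    refine ⟨(c, tokens[c.toNat]), ?_, rfl⟩
    rw [List.mem_filter]
    constructor
    · rw [PySem.List.mem_enumerate_iff]
      exact ⟨c.toNat, hkn, by rw [zero_add, hcast]⟩
    · simp only [Bool.and_eq_true, decide_eq_true_eq]
      refine ⟨⟨h1, h2⟩, ?_⟩
      have : PySem.List.pyGetD tokens c "" = tokens.getD c.toNat "" := by
        conv_lhs => rw [← hcast]
        exact PySem.List.pyGetD_natCast ..
      rw [this, List.getD_eq_getElem _ _ hkn] at h3
      exact h3

-- A's outward loop agrees with the lexicographic minimum of B's candidate list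
theorem pvLoopA_eq_min (tokens : List String) (mid : Int) :
    ∀ (k o : Nat), ((tokens.length : Int) ≤ (o : Int) + (k : Int)) →
    (∀ c, pvCondA tokens (tokens.length : Int) c = true → (o : Int) ≤ |c - mid|) →
    (∀ c, pvCondA tokens (tokens.length : Int) c = true → |c - mid| < (tokens.length : Int)) →
    pvLoopA tokens (tokens.length : Int) mid (PySem.List.pyRange (o : Int) (tokens.length : Int) 1)
      = PySem.List.min2? (pvCands tokens (tokens.length : Int)) (fun i => |i - mid|) (fun i => i) := by
  intro k
  induction k with
  | zero =>
    intro o hno hlow hcover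
    have hnil : pvCands tokens (tokens.length : Int) = [] := by
      rw [List.eq_nil_iff_forall_not_mem]
      intro c hc
      rw [pvMem_cands] at hc
      have := hlow c hc
      have := hcover c hc
      omega
    have hrange : PySem.List.pyRange (o : Int) (tokens.length : Int) 1 = [] := by
      rw [PySem.List.pyRange_one, show ((tokens.length : Int) - (o : Int)).toNat = 0 by omega]
      rfl
    rw [hrange, hnil]
    rfl
  | succ k ih =>
    intro o hno hlow hcover
    by_cases hon : (tokens.length : Int) ≤ (o : Int)
    · -- same as the base case: the range is empty and there are no candidates
      have hnil : pvCands tokens (tokens.length : Int) = [] := by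
        rw [List.eq_nil_iff_forall_not_mem]
        intro c hc
        rw [pvMem_cands] at hc
        have := hlow c hc
        have := hcover c hc
        omega
      have hrange : PySem.List.pyRange (o : Int) (tokens.length : Int) 1 = [] := by
        rw [PySem.List.pyRange_one, show ((tokens.length : Int) - (o : Int)).toNat = 0 by omega]
        rfl
      rw [hrange, hnil]
      rfl
    · push_neg at hon
      rw [PySem.List.pyRange_one_cons hon]
      show (if pvCondA tokens (tokens.length : Int) (mid - (o : Int)) then some (mid - (o : Int))
            else if pvCondA tokens (tokens.length : Int) (mid + (o : Int)) then some (mid + (o : Int))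
            else pvLoopA tokens (tokens.length : Int) mid (PySem.List.pyRange ((o : Int) + 1) (tokens.length : Int) 1)) = _
      by_cases hL : pvCondA tokens (tokens.length : Int) (mid - (o : Int)) = true
      · rw [if_pos hL]
        symm
        apply pvMin2_eq_some
        · exact (pvMem_cands ..).mpr hL
        · intro y hy hne
          rw [pvMem_cands] at hy
          have hyo := hlow y hy
          have habsL : |mid - (o : Int) - mid| = (o : Int) := by
            rcases abs_cases (mid - (o : Int) - mid) with ⟨he, _⟩ | ⟨he, _⟩ <;> omega
          rw [habsL]
          rcases lt_or_eq_of_le hyo with hgt | heqd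
          · exact Or.inl hgt
          · right
            refine ⟨heqd, ?_⟩
            rcases abs_cases (y - mid) with ⟨he, _⟩ | ⟨he, _⟩ <;> omega
      · rw [if_neg hL]
        by_cases hR : pvCondA tokens (tokens.length : Int) (mid + (o : Int)) = true
        · rw [if_pos hR]
          symm
          apply pvMin2_eq_some
          · exact (pvMem_cands ..).mpr hR
          · intro y hy hne
            rw [pvMem_cands] at hy
            have hyo := hlow y hy
            have habsR : |mid + (o : Int) - mid| = (o : Int) := by
              rcases abs_cases (mid + (o : Int) - mid) with ⟨he, _⟩ | ⟨he, _⟩ <;> omega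
            rw [habsR]
            left
            rcases lt_or_eq_of_le hyo with hgt | heqd
            · exact hgt
            · exfalso
              rcases abs_cases (y - mid) with ⟨he, _⟩ | ⟨he, _⟩
              · apply hne; omega
              · apply hL; rw [show mid - (o : Int) = y by omega]; exact hy
        · rw [if_neg hR]
          have hcast : ((o : Int) + 1) = ((o + 1 : Nat) : Int) := by push_cast; ring
          rw [hcast]
          apply ih
          · push_cast; push_cast at hno; omega
          · intro c hc
            have := hlow c hc
            rcases lt_or_eq_of_le this with hgt | heqd
            · push_cast; omega
            · exfalso
              rcases abs_cases (c - mid) with ⟨he, _⟩ | ⟨he, _⟩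
              · apply hR; rw [show mid + (o : Int) = c by omega]; exact hc
              · apply hL; rw [show mid - (o : Int) = c by omega]; exact hc
          · exact hcover

-- ===== VERDICT (by name: the statement is the Claim_ definition above) =====
theorem ensure_inter_sentential_shape_py_spec : Claim_equal_ensure_inter_sentential_shape_py := by
  intro tokens _
  unfold Spec_ensure_inter_sentential_shape_py
  unfold ensure_inter_sentential_shape_py ensure_inter_sentential_shape_py_alt
  by_cases hgate : (PySem.List.slice tokens none (some (-1))).any pvIsSentPunct = true
  · simp only [hgate, if_true]
  · simp only [hgate, if_false, Bool.not_eq_true] at *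
    rw [if_neg (by simp [hgate]), if_neg (by simp [hgate])]
    have hmid : ∀ c, pvCondA tokens (tokens.length : Int) c = true →
        |c - PySem.Int.floordiv (tokens.length : Int) 2| < (tokens.length : Int) := by
      intro c hc
      simp only [pvCondA, Bool.and_eq_true, decide_eq_true_eq] at hc
      obtain ⟨⟨h1, h2⟩, _⟩ := hc
      have hfd : PySem.Int.floordiv (tokens.length : Int) 2 = (tokens.length : Int) / 2 := by
        unfold PySem.Int.floordiv
        rw [Int.fdiv_eq_ediv]
        norm_num
      rw [hfd]
      rcases abs_cases (c - (tokens.length : Int) / 2) with ⟨he, _⟩ | ⟨he, _⟩ <;> omega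
    have hloop := pvLoopA_eq_min tokens (PySem.Int.floordiv (tokens.length : Int) 2) tokens.length 0
      (by push_cast; omega) (fun c _ => by simpa using abs_nonneg (c - PySem.Int.floordiv (tokens.length : Int) 2)) hmid
    simp only [Nat.cast_zero] at hloop
    simp only [pvCands] at hloop
    rw [hloop]
    cases hmin : PySem.List.min2?
        (((PySem.List.enumerate tokens 0).filter
          (fun p => decide (0 < p.1) && decide (p.1 < (tokens.length : Int) - 1) && pvIsMarker p.2)).map (·.1))
        (fun i => |i - PySem.Int.floordiv (tokens.length : Int) 2|) (fun i => i) with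
    | none => rfl
    | some si => simp only [ite_self]
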